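-- pv_equiv track=rewrite | github.com/techcsispit/learning-basics | Python/Basics/stringsep2.py | wordsep
-- ===== SOURCE A (Python) =====
-- def wordsep(s):
--     word = ""
--     spc = ""
--     for i in s:
--         if ord(i) in range(65, 123):
--             word+=i
--         else:
--             spc+=i
--     return word+spc
-- ===== SOURCE B (Python) =====
-- def wordsep(s):
--     return "".join(sorted(s, key=lambda c: 0 if 65 <= ord(c) < 123 else 1))
-- ===== Notes on version B (the rewrite author's own statement) =====
-- stated objective: idiomatic
-- what changed: Replaced the two-accumulator loop with a single stable sort keyed on the partition predicate (letters key 0, rest key 1) joined back into a string; stability keeps both groups in original order.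
import Mathlib
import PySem

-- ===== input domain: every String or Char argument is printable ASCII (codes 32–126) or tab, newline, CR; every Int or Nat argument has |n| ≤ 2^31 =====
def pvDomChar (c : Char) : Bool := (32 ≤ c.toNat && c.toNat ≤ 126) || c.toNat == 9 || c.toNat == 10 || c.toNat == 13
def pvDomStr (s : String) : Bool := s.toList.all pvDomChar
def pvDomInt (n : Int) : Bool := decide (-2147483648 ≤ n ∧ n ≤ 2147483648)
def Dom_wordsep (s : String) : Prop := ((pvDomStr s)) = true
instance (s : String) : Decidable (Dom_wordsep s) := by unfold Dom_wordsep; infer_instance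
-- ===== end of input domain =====

-- B replaces A's two-accumulator loop by one stable sort keyed on the partition predicate (idiomatic).

-- ===== PORT A =====
-- A's loop over the characters, carrying the two accumulators word and spc; returns word+spc.
def wordsepLoop (xs : List Char) (word spc : List Char) : List Char :=
  match xs with
  | [] => word ++ spc
  | c :: rest =>
    if 65 ≤ c.toNat ∧ c.toNat < 123 then wordsepLoop rest (word ++ [c]) spc
    else wordsepLoop rest word (spc ++ [c])

def wordsep (s : String) : String := String.ofList (wordsepLoop s.toList [] [])

-- ===== PORT B =====
-- key=lambda c: 0 if 65 <= ord(c) < 123 else 1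
def wkey (c : Char) : Nat := if 65 ≤ c.toNat ∧ c.toNat < 123 then 0 else 1

def wordsep_alt (s : String) : String := String.ofList (PySem.List.sorted s.toList wkey false)

-- ===== PRECONDITION & SPEC =====
def Spec_wordsep (s : String) (out : String) : Prop := out = wordsep_alt s
instance (s : String) (out : String) : Decidable (Spec_wordsep s out) := by unfold Spec_wordsep; infer_instance

-- ===== CLAIM (what is proved, stated in full; the proofs are below) =====
def Claim_equal_wordsep : Prop := ∀ (s : String), Dom_wordsep s → Spec_wordsep s (wordsep s)

-- ===== LEMMAS AND PROOFS =====

def wP (c : Char) : Bool := decide (65 ≤ c.toNat ∧ c.toNat < 123)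

lemma wkey_le_one (c : Char) : wkey c ≤ 1 := by
  unfold wkey; split_ifs <;> omega

lemma wkey_eq_zero_iff (c : Char) : wkey c = 0 ↔ wP c = true := by
  unfold wkey wP; split_ifs with h <;> simp [h]

lemma loop_eq (xs : List Char) : ∀ w sp : List Char,
    wordsepLoop xs w sp = (w ++ xs.filter wP) ++ (sp ++ xs.filter (fun c => ! wP c)) := by
  induction xs with
  | nil => intro w sp; simp [wordsepLoop]
  | cons c rest ih =>
    intro w sp
    by_cases h : 65 ≤ c.toNat ∧ c.toNat < 123
    · simp [wordsepLoop, h, ih, wP, List.filter]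
    · simp [wordsepLoop, h, ih, wP, List.filter]

lemma ins_zero (x : Char) (hx : wkey x = 0) :
    ∀ (A B : List Char), (∀ a ∈ A, wkey a = 0) → (∀ b ∈ B, wkey b = 1) →
    PySem.List.insertBy (fun a b => decide (wkey a < wkey b)) x (A ++ B) = A ++ x :: B := by
  intro A
  induction A with
  | nil =>
    intro B _ hB
    cases B with
    | nil => simp [PySem.List.insertBy]
    | cons b B' =>
      have hb : wkey b = 1 := hB b (by simp)
      simp [PySem.List.insertBy, hx, hb]
  | cons a A' ih =>
    intro B hA hB
    have ha : wkey a = 0 := hA a (by simp)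
    have : ¬ (wkey x < wkey a) := by omega
    simp only [List.cons_append, PySem.List.insertBy, this, decide_eq_true_eq]
    simp [ih B (fun a' h' => hA a' (by simp [h'])) hB]

lemma ins_one (x : Char) (hx : wkey x = 1) (L : List Char) :
    PySem.List.insertBy (fun a b => decide (wkey a < wkey b)) x L = L ++ [x] := by
  apply PySem.List.insertBy_of_forall_not_before
  intro y _
  have := wkey_le_one y
  simp; omega

lemma foldl_part (xs : List Char) : ∀ (A B : List Char),
    (∀ a ∈ A, wkey a = 0) → (∀ b ∈ B, wkey b = 1) →
    xs.foldl (fun acc x => PySem.List.insertBy (fun a b => decide (wkey a < wkey b)) x acc) (A ++ B)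
      = (A ++ xs.filter wP) ++ (B ++ xs.filter (fun c => ! wP c)) := by
  induction xs with
  | nil => intro A B _ _; simp
  | cons c rest ih =>
    intro A B hA hB
    by_cases h : wkey c = 0
    · have hstep := ins_zero c h A B hA hB
      have hP : wP c = true := (wkey_eq_zero_iff c).mp h
      simp only [List.foldl_cons, hstep]
      have : A ++ c :: B = (A ++ [c]) ++ B := by simp
      rw [this, ih (A ++ [c]) B
        (by intro a ha; rcases List.mem_append.mp ha with ha' | ha'
            · exact hA a ha'
            · simp at ha'; simpa [ha'] using h) hB]
      simp [List.filter, hP]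
    · have h1 : wkey c = 1 := by have := wkey_le_one c; omega
      have hP : wP c = false := by
        have := (wkey_eq_zero_iff c)
        cases hw : wP c
        · rfl
        · exact absurd (this.mpr hw) h
      simp only [List.foldl_cons, ins_one c h1 (A ++ B)]
      have : (A ++ B) ++ [c] = A ++ (B ++ [c]) := by simp
      rw [this, ih A (B ++ [c]) hA
        (by intro b hb; rcases List.mem_append.mp hb with hb' | hb'
            · exact hB b hb'
            · simp at hb'; simpa [hb'] using h1)]
      simp [List.filter, hP]

lemma sorted_part (xs : List Char) :
    PySem.List.sorted xs wkey false = xs.filter wP ++ xs.filter (fun c => ! wP c) := by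
  rw [PySem.List.sorted_eq_foldl_insertBy]
  simpa using foldl_part xs [] [] (by simp) (by simp)

-- ===== VERDICT (by name: the statement is the Claim_ definition above) =====
theorem wordsep_spec : Claim_equal_wordsep := by
  intro s _
  unfold Spec_wordsep wordsep wordsep_alt
  rw [sorted_part, loop_eq]
  simp
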